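-- pv_equiv track=rewrite | github.com/easygap/quant_trader | core/strategy_ensemble.py | _resolve_conservative
-- ===== SOURCE A (Python) =====
-- def _resolve_conservative(parts: list[tuple[str, str, float]]) -> str:
--     """보수적: 참여 전략이 모두 같은 신호일 때만 해당 신호, 아니면 HOLD"""
--     votes = [p[1] for p in parts]
--     if not votes:
--         return "HOLD"
--     if all(v == "BUY" for v in votes):
--         return "BUY"
--     if all(v == "SELL" for v in votes):
--         return "SELL"
--     return "HOLD"
-- ===== SOURCE B (Python) =====
-- def _resolve_conservative(parts: list[tuple[str, str, float]]) -> str: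
--     consensus = None
--     for p in parts:
--         tag = p[1]
--         if consensus is None:
--             consensus = tag
--         elif tag != consensus:
--             return "HOLD"
--     return consensus if consensus in ("BUY", "SELL") else "HOLD"
-- ===== Notes on version B (the rewrite author's own statement) =====
-- stated objective: alternative
-- what changed: Replaces the votes-list materialisation plus two separate short-circuit all() scans by a single early-exit loop carrying a consensus accumulator (first tag seen, bail out to HOLD on the first disagreement), followed by one membership test of the consensus in ('BUY','SELL').
import Mathlib
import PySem

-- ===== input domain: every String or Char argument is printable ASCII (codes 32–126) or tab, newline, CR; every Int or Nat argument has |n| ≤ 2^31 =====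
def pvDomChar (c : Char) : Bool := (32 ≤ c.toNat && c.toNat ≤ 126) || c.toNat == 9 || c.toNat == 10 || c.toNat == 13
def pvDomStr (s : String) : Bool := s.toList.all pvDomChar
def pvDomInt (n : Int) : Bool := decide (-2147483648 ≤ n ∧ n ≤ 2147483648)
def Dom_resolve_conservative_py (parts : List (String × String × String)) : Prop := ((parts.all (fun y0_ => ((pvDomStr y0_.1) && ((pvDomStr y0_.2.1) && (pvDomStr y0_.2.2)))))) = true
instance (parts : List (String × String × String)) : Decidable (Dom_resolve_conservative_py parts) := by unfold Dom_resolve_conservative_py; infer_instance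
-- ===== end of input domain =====

-- B replaces the votes list plus two all() scans by a single early-exit loop carrying a
-- consensus accumulator, then one membership test of the consensus (alternative decomposition).


-- ===== PORT A =====
def resolve_conservative_py (parts : List (String × String × String)) : String :=
  let votes := parts.map (fun p => p.2.1)
  if votes = [] then "HOLD"
  else if votes.all (fun v => v == "BUY") then "BUY"
  else if votes.all (fun v => v == "SELL") then "SELL"
  else "HOLD"

-- ===== PORT B =====
-- the for-loop of Source B: early return "HOLD" on a disagreeing tag, else carry the consensus
def altFinish (consensus : Option String) : String :=
  match consensus with
  | some c => if c == "BUY" || c == "SELL" then c else "HOLD"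
  | none => "HOLD"

def altLoop (consensus : Option String) : List (String × String × String) → String
  | [] => altFinish consensus
  | p :: rest =>
    match consensus with
    | none => altLoop (some p.2.1) rest
    | some c => if p.2.1 ≠ c then "HOLD" else altLoop (some c) rest

def resolve_conservative_py_alt (parts : List (String × String × String)) : String :=
  altLoop none parts

-- ===== PRECONDITION & SPEC =====
def Spec_resolve_conservative_py (parts : List (String × String × String)) (out : String) : Prop := out = resolve_conservative_py_alt parts
instance (parts : List (String × String × String)) (out : String) : Decidable (Spec_resolve_conservative_py parts out) := by unfold Spec_resolve_conservative_py; infer_instance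

-- ===== CLAIM (what is proved, stated in full; the proofs are below) =====
def Claim_equal_resolve_conservative_py : Prop := ∀ (parts : List (String × String × String)), Dom_resolve_conservative_py parts → Spec_resolve_conservative_py parts (resolve_conservative_py parts)

-- ===== LEMMAS AND PROOFS =====

-- running the loop with an established consensus c: HOLD on any disagreement, else finish c
theorem altLoop_some (rest : List (String × String × String)) (c : String) :
    altLoop (some c) rest =
      if rest.all (fun p => p.2.1 == c) then altFinish (some c) else "HOLD" := by
  induction rest with
  | nil => simp [altLoop]
  | cons p rs ih =>
    by_cases h : p.2.1 = c
    · subst h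
      rw [altLoop, if_neg (by simp), ih, List.all_cons, beq_self_eq_true, Bool.true_and]
    · simp [altLoop, h]

-- ===== VERDICT (by name: the statement is the Claim_ definition above) =====
theorem resolve_conservative_py_spec : Claim_equal_resolve_conservative_py := by
  intro parts _
  unfold Spec_resolve_conservative_py resolve_conservative_py resolve_conservative_py_alt
  cases parts with
  | nil => rfl
  | cons p rest =>
    simp only [altLoop, altLoop_some]
    rw [if_neg (by simp)]
    have hmap : ∀ (s : String),
        ((p :: rest).map (fun q => q.2.1)).all (fun v => v == s)
          = (p.2.1 == s && rest.all (fun q => q.2.1 == s)) := by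
      intro s; simp [List.all_map, Function.comp_def]
    rw [hmap, hmap]
    by_cases hB : p.2.1 = "BUY"
    · rw [hB]
      cases hr : rest.all (fun q => q.2.1 == ("BUY" : String)) <;>
        simp [altFinish, hr]
    · by_cases hS : p.2.1 = "SELL"
      · rw [hS]
        cases hr : rest.all (fun q => q.2.1 == ("SELL" : String)) <;>
          simp [altFinish, hr]
      · cases hr : rest.all (fun q => q.2.1 == p.2.1) <;>
          simp [altFinish, hr, hB, hS]
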